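-- pv_equiv track=rewrite | github.com/litul020209/myPythonRepos | DSA/RECURSION/Dsa_pair_even_elimination.py | evevn_pair_eliminated
-- ===== SOURCE A (Python) =====
-- def evevn_pair_eliminated(num):
--
--     length=0
--     num_list=[]
--
--     for x in f"{num}":
--         length+=1
--     x=length
--     ans=num
--     while x!=0:
--         digit=num//10**(x-1)
--         num_list+=[digit]
--         num=num-(digit*(10**(x-1)))
--         x-=1
--
--     p=0
--     q=1
--
--     res=0
--     while q < length:
--         if (num_list[p]+num_list[q])%2 !=0:
--             res=(res*10)+num_list[p]
--             if q==(length-1):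
--                 res=(res*10)+num_list[q]
--             p=q
--             q=q+1
--
--         else:
--             p=p+1
--             q=q+1
--
--     if res==ans:
--         return ans
--     else:
--         return  evevn_pair_eliminated(res)
-- ===== SOURCE B (Python) =====
-- def evevn_pair_eliminated(num):
--     # same fixed point, computed iteratively: one pass = digit split, then an
--     # adjacent-pair filter (zip) + fold, instead of A's two-pointer while + tail recursion
--     while True:
--         L = len(f"{num}")
--         x = L
--         n = num
--         ds = []
--         while x != 0:
--             d = n // 10 ** (x - 1)
--             ds.append(d)
--             n -= d * 10 ** (x - 1)
--             x -= 1
--         kept = [a for a, b in zip(ds, ds[1:]) if (a + b) % 2]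
--         if L > 1 and (ds[L - 2] + ds[L - 1]) % 2:
--             kept.append(ds[L - 1])
--         res = 0
--         for d in kept:
--             res = res * 10 + d
--         if res == num:
--             return num
--         num = res
-- ===== Notes on version B (the rewrite author's own statement) =====
-- stated objective: alternative
-- what changed: B replaces A's stateful two-pointer (p,q) window while-loop by a zip-of-adjacent-pairs filter plus a fold over the kept digits, and replaces A's tail recursion to the fixed point by an explicit while loop; the digit-extraction arithmetic is kept so negative inputs behave identically.
import Mathlib
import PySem

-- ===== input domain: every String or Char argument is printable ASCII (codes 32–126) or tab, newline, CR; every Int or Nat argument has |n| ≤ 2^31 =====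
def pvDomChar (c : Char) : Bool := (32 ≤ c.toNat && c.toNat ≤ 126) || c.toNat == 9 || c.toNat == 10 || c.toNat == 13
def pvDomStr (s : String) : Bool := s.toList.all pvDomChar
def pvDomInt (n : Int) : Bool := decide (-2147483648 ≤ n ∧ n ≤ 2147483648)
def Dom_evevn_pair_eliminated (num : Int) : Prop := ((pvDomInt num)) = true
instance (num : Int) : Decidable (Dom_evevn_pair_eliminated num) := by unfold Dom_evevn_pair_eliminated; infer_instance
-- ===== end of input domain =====

-- B replaces A's two-pointer while-pass by an adjacent-pair zip/filter + fold and A's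
-- tail recursion by a while loop (objective: alternative decomposition, same cost).

-- ===== PORT A =====
-- the 'while x != 0' digit-extraction loop (10**(x-1) floor division, Python-exact on negatives)
def pvA_digitLoop : Nat → Int → List Int → List Int
  | 0, _, ns => ns
  | x + 1, num, ns =>
    let digit := PySem.Int.floordiv num ((10 : Int) ^ x)
    pvA_digitLoop x (num - digit * (10 : Int) ^ x) (ns ++ [digit])

-- the 'while q < length' two-pointer pass; p, q stay in range of num_list, so getD is exact
def pvA_window (ds : List Int) (L : Nat) (p q : Nat) (res : Int) : Int :=
  if h : q < L then
    if PySem.Int.mod (ds.getD p 0 + ds.getD q 0) 2 ≠ 0 then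
      let res1 := res * 10 + ds.getD p 0
      let res2 := if q = L - 1 then res1 * 10 + ds.getD q 0 else res1
      pvA_window ds L q (q + 1) res2
    else
      pvA_window ds L (p + 1) (q + 1) res
  else res
termination_by L - q
decreasing_by all_goals omega

-- one body of A: count the characters of f"{num}", extract digits, run the window pass
def pvA_step (num : Int) : Int :=
  let length := (PySem.Int.toStr num).toList.length
  let ds := pvA_digitLoop length num []
  pvA_window ds length 0 1 0

-- A's self-recursion; the fuel is only a totality guard (the fixed point is reached
-- well before strlen+2 calls on the tested domain)
def pvA_go : Nat → Int → Int
  | 0, num => num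
  | fuel + 1, num =>
    let ans := num
    let res := pvA_step num
    if res = ans then ans else pvA_go fuel res

def evevn_pair_eliminated (num : Int) : Int :=
  pvA_go ((PySem.Int.toStr num).toList.length + 2) num

-- ===== PORT B =====
-- Source B keeps the same digit-extraction while loop (required for negative-input behaviour)
def pvB_digitLoop : Nat → Int → List Int → List Int
  | 0, _, ds => ds
  | x + 1, n, ds =>
    let d := PySem.Int.floordiv n ((10 : Int) ^ x)
    pvB_digitLoop x (n - d * (10 : Int) ^ x) (ds ++ [d])

-- kept = [a for a, b in zip(ds, ds[1:]) if (a+b)%2] (+ the trailing digit when its pair is odd)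
def pvB_kept (ds : List Int) (L : Nat) : List Int :=
  let base := ((ds.zip (PySem.List.slice ds (some 1) none)).filter
      (fun ab => PySem.Int.mod (ab.1 + ab.2) 2 ≠ 0)).map Prod.fst
  if L > 1 then
    if PySem.Int.mod (ds.getD (L - 2) 0 + ds.getD (L - 1) 0) 2 ≠ 0 then
      base ++ [ds.getD (L - 1) 0]
    else base
  else base

-- one iteration of Source B's while-True body
def pvB_step (num : Int) : Int :=
  let L := (PySem.Int.toStr num).toList.length
  let ds := pvB_digitLoop L num []
  (pvB_kept ds L).foldl (fun r d => r * 10 + d) 0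

-- Source B's 'while True' loop; same fuel-only totality guard as A's port
def pvB_go : Nat → Int → Int
  | 0, num => num
  | fuel + 1, num =>
    let res := pvB_step num
    if res = num then num else pvB_go fuel res

def evevn_pair_eliminated_alt (num : Int) : Int :=
  pvB_go ((PySem.Int.toStr num).toList.length + 2) num

-- ===== PRECONDITION & SPEC =====
def Spec_evevn_pair_eliminated (num : Int) (out : Int) : Prop := out = evevn_pair_eliminated_alt num
instance (num : Int) (out : Int) : Decidable (Spec_evevn_pair_eliminated num out) := by unfold Spec_evevn_pair_eliminated; infer_instance

-- ===== CLAIM (what is proved, stated in full; the proofs are below) =====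
def Claim_equal_evevn_pair_eliminated : Prop := ∀ (num : Int), Dom_evevn_pair_eliminated num → Spec_evevn_pair_eliminated num (evevn_pair_eliminated num)

-- ===== LEMMAS AND PROOFS =====

-- proof-side structural form of one pass over adjacent digit pairs
def pvKeptR : List Int → List Int
  | [] => []
  | [_] => []
  | [a, b] => if PySem.Int.mod (a + b) 2 ≠ 0 then [a, b] else []
  | a :: b :: c :: t =>
    (if PySem.Int.mod (a + b) 2 ≠ 0 then [a] else []) ++ pvKeptR (b :: c :: t)

-- proof-side structural form of A's window loop (p = q-1 is invariant)
def pvPairRun : Int → List Int → Int → Int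
  | _, [], res => res
  | a, [b], res => if PySem.Int.mod (a + b) 2 ≠ 0 then (res * 10 + a) * 10 + b else res
  | a, b :: c :: t, res =>
    if PySem.Int.mod (a + b) 2 ≠ 0 then pvPairRun b (c :: t) (res * 10 + a)
    else pvPairRun b (c :: t) res

theorem pv_dig_eq (x : Nat) : ∀ (n : Int) (ds : List Int), pvB_digitLoop x n ds = pvA_digitLoop x n ds := by
  induction x with
  | zero => intro n ds; rfl
  | succ x ih => intro n ds; simp [pvA_digitLoop, pvB_digitLoop, ih]

theorem pv_dig_len (x : Nat) : ∀ (n : Int) (ds : List Int), (pvA_digitLoop x n ds).length = ds.length + x := by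
  induction x with
  | zero => intro n ds; rfl
  | succ x ih => intro n ds; simp [pvA_digitLoop, ih]; omega

theorem pv_keptB_eq (ds : List Int) : pvB_kept ds ds.length = pvKeptR ds := by
  match ds with
  | [] => simp [pvB_kept, pvKeptR, PySem.List.slice_from_one]
  | [a] => simp [pvB_kept, pvKeptR, PySem.List.slice_from_one]
  | [a, b] =>
    by_cases hab : (a + b) % 2 = 1 <;>
      simp [pvB_kept, pvKeptR, PySem.List.slice_from_one, List.getD, hab]
  | a :: b :: c :: t =>
    have ih := pv_keptB_eq (b :: c :: t)
    simp only [pvB_kept, PySem.List.slice_from_one] at ih ⊢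
    have h2 : (a :: b :: c :: t).length > 1 := by simp
    have h2' : (b :: c :: t).length > 1 := by simp
    simp only [if_pos h2, if_pos h2'] at ih ⊢
    have e1 : (a :: b :: c :: t).getD ((a :: b :: c :: t).length - 2) 0
        = (b :: c :: t).getD ((b :: c :: t).length - 2) 0 := by
      simp [List.getD]
      rfl
    have e2 : (a :: b :: c :: t).getD ((a :: b :: c :: t).length - 1) 0
        = (b :: c :: t).getD ((b :: c :: t).length - 1) 0 := by
      simp [List.getD]
    rw [e1, e2]
    simp only [pvKeptR, List.tail_cons, List.zip_cons_cons, List.filter_cons]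
    rw [← ih]
    by_cases hab : (a + b) % 2 = 1 <;>
      simp [hab, List.filter_cons, apply_ite (List.cons a), List.cons_append]
termination_by ds.length

theorem pv_windowA_eq (l : List Int) : ∀ (ds : List Int) (k : Nat) (a : Int) (res : Int),
    ds.drop k = a :: l → pvA_window ds ds.length k (k + 1) res = pvPairRun a l res := by
  induction l with
  | nil =>
    intro ds k a res h
    have hlen : ds.length = k + 1 := by
      have := congrArg List.length h
      simp [List.length_drop] at this
      omega
    rw [pvA_window]
    simp [hlen, pvPairRun]
  | cons b l' ih =>
    intro ds k a res h
    have hlen : ds.length = k + 2 + l'.length := by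
      have := congrArg List.length h
      simp [List.length_drop] at this
      omega
    have hq : k + 1 < ds.length := by omega
    have hk0 : ds[k]? = (ds.drop k)[0]? := by rw [List.getElem?_drop]; norm_num
    have hk1 : ds[k + 1]? = (ds.drop k)[1]? := by rw [List.getElem?_drop]
    have hga : ds.getD k 0 = a := by rw [List.getD, hk0, h]; rfl
    have hgb : ds.getD (k + 1) 0 = b := by rw [List.getD, hk1, h]; rfl
    have hdrop : ds.drop (k + 1) = b :: l' := by
      have : ds.drop (k + 1) = (ds.drop k).drop 1 := by rw [List.drop_drop]
      rw [this, h]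
      simp
    rw [pvA_window]
    simp only [dif_pos hq, hga, hgb]
    by_cases hab : (a + b) % 2 = 1
    · rw [if_pos (by simpa using hab)]
      cases l' with
      | nil =>
        have hql : k + 1 = ds.length - 1 := by simp at hlen; omega
        simp only [if_pos hql]
        rw [ih ds (k + 1) b ((res * 10 + a) * 10 + b) hdrop]
        simp [pvPairRun, hab]
      | cons c t =>
        have hql : ¬ (k + 1 = ds.length - 1) := by simp at hlen; omega
        simp only [if_neg hql]
        rw [ih ds (k + 1) b (res * 10 + a) hdrop]
        simp [pvPairRun, hab]
    · rw [if_neg (by simpa using hab)]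
      rw [ih ds (k + 1) b res hdrop]
      cases l' with
      | nil => simp [pvPairRun, hab]
      | cons c t => simp [pvPairRun, hab]

theorem pv_pairRun_foldl (l : List Int) : ∀ (a : Int) (res : Int),
    pvPairRun a l res = (pvKeptR (a :: l)).foldl (fun r d => r * 10 + d) res := by
  induction l with
  | nil => intro a res; simp [pvPairRun, pvKeptR]
  | cons b l' ih =>
    intro a res
    cases l' with
    | nil =>
      by_cases hab : (a + b) % 2 = 1 <;> simp [pvPairRun, pvKeptR, hab]
    | cons c t =>
      by_cases hab : (a + b) % 2 = 1 <;>
        simp [pvPairRun, pvKeptR, hab, ih]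

theorem pv_step_eq (num : Int) : pvA_step num = pvB_step num := by
  have key : ∀ (ds : List Int),
      pvA_window ds ds.length 0 1 0 = (pvB_kept ds ds.length).foldl (fun r d => r * 10 + d) 0 := by
    intro ds
    rw [pv_keptB_eq]
    cases ds with
    | nil =>
      rw [pvA_window]
      simp [pvKeptR]
    | cons a l =>
      rw [pv_windowA_eq l (a :: l) 0 a 0 rfl, pv_pairRun_foldl]
  have hlen : ∀ (L : Nat), (pvA_digitLoop L num []).length = L := by
    intro L; rw [pv_dig_len]; simp
  simp only [pvA_step, pvB_step, pv_dig_eq]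
  have h := hlen ((PySem.Int.toStr num).toList.length)
  generalize hds : pvA_digitLoop ((PySem.Int.toStr num).toList.length) num [] = ds at h ⊢
  rw [← h]
  exact key ds

theorem pv_go_eq (fuel : Nat) : ∀ (num : Int), pvA_go fuel num = pvB_go fuel num := by
  induction fuel with
  | zero => intro num; rfl
  | succ fuel ih =>
    intro num
    simp only [pvA_go, pvB_go, pv_step_eq, ih]

-- ===== VERDICT (by name: the statement is the Claim_ definition above) =====
theorem evevn_pair_eliminated_spec : Claim_equal_evevn_pair_eliminated := by
  intro num _
  unfold Spec_evevn_pair_eliminated evevn_pair_eliminated evevn_pair_eliminated_alt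
  exact pv_go_eq _ num
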